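-- pv_equiv track=rewrite | github.com/reddyeswaranush/code | 3934-coupon-code-validator/coupon-code-validator.py | validateCoupons
-- ===== SOURCE A (Python) =====
-- from typing import List
--
-- def validateCoupons(code: List[str], businessLine: List[str], isActive: List[bool]) -> List[str]:
--     b=["electronics","grocery","pharmacy","restaurant"]
--     s=["!","@","#","$","^","&","*","(",")","+",".","?","/",">","<","=","-"]
--     d={"electronics":[],"grocery":[],"pharmacy":[],"restaurant":[]}
--     l=[]
--     for i in range(0,len(code)):
--         c=0
--         if((businessLine[i] in b) and (isActive[i]==True)):
--             a=code[i]
--             if(a!=""):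
--                 for j in a:
--                     if j in s:
--                         break
--                     else:
--                         c=c+1
--                 if(c==len(a)):
--
--                     d[businessLine[i]].append(a)
--     for i in d:
--         d[i].sort()
--     for i in d:
--         if(d[i]!=[]):
--             l.extend(d[i])
--     return l
-- ===== SOURCE B (Python) =====
-- def validateCoupons(code, businessLine, isActive):
--     b = ["electronics", "grocery", "pharmacy", "restaurant"]
--     bad = "!@#$^&*()+.?/><=-"
--     pairs = []
--     for i in range(len(code)):
--         ln = businessLine[i]
--         if ln in b and isActive[i] and code[i] and all(ch not in bad for ch in code[i]):
--             pairs.append((b.index(ln), code[i]))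
--     pairs.sort(key=lambda p: p[1])
--     pairs.sort(key=lambda p: p[0])
--     return [c for _, c in pairs]
-- ===== Notes on version B (the rewrite author's own statement) =====
-- stated objective: simpler
-- what changed: Replaces A's dict of four per-line buckets, per-character counting loop, four separate in-place bucket sorts and ordered concatenation by one flat list of (line-index, code) pairs built with an all() validity check and ordered by the idiomatic two-pass stable sort (secondary key then primary key).
import Mathlib
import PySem

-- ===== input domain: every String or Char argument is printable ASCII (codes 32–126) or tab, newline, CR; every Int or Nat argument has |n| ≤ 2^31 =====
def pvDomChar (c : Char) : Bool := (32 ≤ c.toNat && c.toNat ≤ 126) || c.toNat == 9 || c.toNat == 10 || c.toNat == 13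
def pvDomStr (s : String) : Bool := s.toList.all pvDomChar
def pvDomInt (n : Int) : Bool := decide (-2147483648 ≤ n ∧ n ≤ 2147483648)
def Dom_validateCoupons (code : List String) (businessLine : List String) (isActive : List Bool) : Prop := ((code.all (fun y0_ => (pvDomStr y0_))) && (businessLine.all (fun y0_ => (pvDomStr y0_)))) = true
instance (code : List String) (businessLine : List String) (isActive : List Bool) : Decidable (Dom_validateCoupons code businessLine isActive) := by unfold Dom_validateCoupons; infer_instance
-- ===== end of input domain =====

-- B replaces A's dict of four per-line buckets (each sorted separately, then concatenated) by one
-- flat list of (line-index, code) pairs ordered by two stable single-key sorts (objective: simpler).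

-- ===== PORT A =====
def pvLinesA : List String := ["electronics", "grocery", "pharmacy", "restaurant"]
-- A's list s of one-character strings, each held as the Char it contains (exact: membership of a
-- one-character Python string in s is membership of its character here)
def pvSpecialsA : List Char := ['!', '@', '#', '$', '^', '&', '*', '(', ')', '+', '.', '?', '/', '>', '<', '=', '-']

-- the inner 'for j in a: if j in s: break else: c=c+1' loop
def pvCountA : List Char → Nat → Nat
  | [], c => c
  | j :: rest, c => if j ∈ pvSpecialsA then c else pvCountA rest (c + 1)

def pvD0A : PySem.Dict String (List String) :=
  PySem.Dict.ofList [("electronics", []), ("grocery", []), ("pharmacy", []), ("restaurant", [])]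

-- one iteration of A's 'for i in range(0, len(code))' loop (branches in Python's order;
-- the 'none' branches of pyGet? are Python's IndexError, excluded by Pre_)
def pvStepA (code businessLine : List String) (isActive : List Bool)
    (d : PySem.Dict String (List String)) (i : Nat) : PySem.Dict String (List String) :=
  match PySem.List.pyGet? businessLine (i : Int) with
  | none => d
  | some ln =>
    if ln ∈ pvLinesA then
      match PySem.List.pyGet? isActive (i : Int) with
      | none => d
      | some act =>
        if act = true then
          match PySem.List.pyGet? code (i : Int) with
          | none => d
          | some a =>
            if a ≠ "" then
              if pvCountA a.toList 0 = a.toList.length then d.modify ln [] (fun xs => xs ++ [a])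
              else d
            else d
        else d
    else d

def validateCoupons (code : List String) (businessLine : List String) (isActive : List Bool) : List String :=
  let d := (List.range code.length).foldl (pvStepA code businessLine isActive) pvD0A
  -- 'for i in d: d[i].sort()'
  let d2 := d.keys.foldl (fun d' k => d'.modify k [] (fun xs => PySem.List.sorted xs (fun x => x) false)) d
  -- 'for i in d: if d[i] != []: l.extend(d[i])'
  d2.keys.foldl (fun l k => if d2.getD k [] ≠ [] then l ++ d2.getD k [] else l) []

-- ===== PORT B =====
def pvLinesB : List String := ["electronics", "grocery", "pharmacy", "restaurant"]
def pvBadB : List Char := ['!', '@', '#', '$', '^', '&', '*', '(', ')', '+', '.', '?', '/', '>', '<', '=', '-']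
-- 'all(ch not in bad for ch in a)'
def pvOkB (a : String) : Bool := a.toList.all (fun ch => decide (ch ∉ pvBadB))
-- 'b.index(ln)' (guarded by 'ln in b' at the call site, so the getD default is never used)
def pvIdxB (ln : String) : Nat := (PySem.List.index? pvLinesB ln).getD 0

-- one iteration of B's collection loop
def pvStepB (code businessLine : List String) (isActive : List Bool)
    (pairs : List (Nat × String)) (i : Nat) : List (Nat × String) :=
  match PySem.List.pyGet? businessLine (i : Int) with
  | none => pairs
  | some ln =>
    if ln ∈ pvLinesB then
      match PySem.List.pyGet? isActive (i : Int) with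
      | none => pairs
      | some act =>
        if act = true then
          match PySem.List.pyGet? code (i : Int) with
          | none => pairs
          | some a =>
            if a ≠ "" then
              if pvOkB a then pairs ++ [(pvIdxB ln, a)] else pairs
            else pairs
        else pairs
    else pairs

def validateCoupons_alt (code : List String) (businessLine : List String) (isActive : List Bool) : List String :=
  let pairs := (List.range code.length).foldl (pvStepB code businessLine isActive) []
  -- two stable sorts: secondary key (the code) first, then primary key (the line index)
  let s1 := PySem.List.sorted pairs (fun p => p.2) false
  let s2 := PySem.List.sorted s1 (fun p => p.1) false
  s2.map (fun p => p.2)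

-- ===== PRECONDITION & SPEC =====
-- Pre_ excludes exactly the inputs where A raises IndexError: an index i < len(code) with
-- businessLine too short, or with businessLine[i] a valid line but isActive too short
-- (isActive[i] is only read when businessLine[i] is in b, because 'and' short-circuits).
def Pre_validateCoupons (code : List String) (businessLine : List String) (isActive : List Bool) : Prop :=
  code.length ≤ businessLine.length ∧
  ∀ i, i < code.length →
    businessLine.getD i "" ∈ (["electronics", "grocery", "pharmacy", "restaurant"] : List String) →
    i < isActive.length
instance (code : List String) (businessLine : List String) (isActive : List Bool) : Decidable (Pre_validateCoupons code businessLine isActive) := by unfold Pre_validateCoupons; infer_instance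

def pvWitness_validateCoupons : List String × List String × List Bool :=
  (["SAVE20", "a-b"], ["grocery", "electronics"], [true, true])

def Spec_validateCoupons (code : List String) (businessLine : List String) (isActive : List Bool) (out : List String) : Prop := out = validateCoupons_alt code businessLine isActive
instance (code : List String) (businessLine : List String) (isActive : List Bool) (out : List String) : Decidable (Spec_validateCoupons code businessLine isActive out) := by unfold Spec_validateCoupons; infer_instance

-- ===== CLAIM (what is proved, stated in full; the proofs are below) =====
def Claim_equal_validateCoupons : Prop := ∀ (code : List String) (businessLine : List String) (isActive : List Bool), Dom_validateCoupons code businessLine isActive → Pre_validateCoupons code businessLine isActive → Spec_validateCoupons code businessLine isActive (validateCoupons code businessLine isActive)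

-- ===== LEMMAS AND PROOFS =====

-- spec-level description of the accepted (line-index, code) pairs, in input order
def pvAccOpt (code businessLine : List String) (isActive : List Bool) (i : Nat) : Option (Nat × String) :=
  let ln := businessLine.getD i ""
  let a := code.getD i ""
  if ln ∈ pvLinesB ∧ isActive.getD i false = true ∧ a ≠ "" ∧ pvOkB a = true then
    some (pvIdxB ln, a)
  else none

def pvPairs (code businessLine : List String) (isActive : List Bool) (n : Nat) : List (Nat × String) :=
  (List.range n).filterMap (pvAccOpt code businessLine isActive)

theorem pvCountA_eq_iff (l : List Char) (c : Nat) :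
    pvCountA l c = c + l.length ↔ ∀ ch ∈ l, ch ∉ pvSpecialsA := by
  induction l generalizing c with
  | nil => simp [pvCountA]
  | cons j rest ih =>
    by_cases hj : j ∈ pvSpecialsA
    · have hle : pvCountA (j :: rest) c = c := by simp [pvCountA, hj]
      constructor
      · intro h; rw [hle] at h; simp only [List.length_cons] at h; omega
      · intro h; exact absurd hj (h j (List.mem_cons_self))
    · have : pvCountA (j :: rest) c = pvCountA rest (c + 1) := by simp [pvCountA, hj]
      rw [this]
      constructor
      · intro h ch hch
        rcases List.mem_cons.mp hch with rfl | hch'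
        · exact hj
        · refine ((ih (c + 1)).mp ?_) ch hch'
          simp only [List.length_cons] at h; omega
      · intro h
        have := (ih (c + 1)).mpr (fun ch hch => h ch (List.mem_cons_of_mem _ hch))
        simp only [List.length_cons]; omega

theorem pvFilter_insertBy {α : Type} (key : α → Nat) (x : α) (ys : List α)
    (hs : ys.Pairwise (fun a b => key a ≤ key b)) (v : Nat) :
    (PySem.List.insertBy (fun a b => decide (key a < key b)) x ys).filter (fun y => decide (key y = v)) =
      if key x = v then ys.filter (fun y => decide (key y = v)) ++ [x]
      else ys.filter (fun y => decide (key y = v)) := by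
  induction ys with
  | nil =>
    rw [PySem.List.insertBy.eq_def]
    simp only [List.filter_cons, List.filter_nil]
    by_cases hv : key x = v <;> simp [hv]
  | cons y ys' ih =>
    rw [PySem.List.insertBy.eq_def]
    simp only []
    by_cases hlt : key x < key y
    · simp only [hlt, decide_true, if_true]
      by_cases hv : key x = v
      · have hnil : (y :: ys').filter (fun y => decide (key y = v)) = [] := by
          rw [List.filter_eq_nil_iff]
          intro z hz
          rcases List.mem_cons.mp hz with rfl | hz'
          · simp; omega
          · have := (List.pairwise_cons.mp hs).1 z hz'
            simp; omega
        rw [List.filter_cons, if_pos hv, hnil]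
        simp [hv]
      · rw [if_neg hv, List.filter_cons]
        simp [hv]
    · simp only [hlt, decide_false, Bool.false_eq_true, if_false]
      have htail := ih (List.pairwise_cons.mp hs).2
      rw [List.filter_cons, List.filter_cons]
      by_cases hy : key y = v
      · simp only [hy, decide_true, if_true]
        rw [htail]
        by_cases hv : key x = v <;> simp [hv]
      · simp only [hy, decide_false, Bool.false_eq_true, if_false]
        exact htail

theorem pvPairwise_insertBy {α : Type} (key : α → Nat) (x : α) (ys : List α)
    (hs : ys.Pairwise (fun a b => key a ≤ key b)) :
    (PySem.List.insertBy (fun a b => decide (key a < key b)) x ys).Pairwise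
      (fun a b => key a ≤ key b) := by
  induction ys with
  | nil => simp [PySem.List.insertBy]
  | cons y ys' ih =>
    rw [PySem.List.insertBy.eq_def]
    simp only []
    rcases List.pairwise_cons.mp hs with ⟨hy, hys'⟩
    by_cases hlt : key x < key y
    · simp only [hlt, decide_true, if_true]
      refine List.pairwise_cons.mpr ⟨?_, hs⟩
      intro z hz
      rcases List.mem_cons.mp hz with rfl | hz'
      · omega
      · have := hy z hz'; omega
    · simp only [hlt, decide_false, Bool.false_eq_true, if_false]
      refine List.pairwise_cons.mpr ⟨?_, ih hys'⟩
      intro z hz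
      rcases (PySem.List.mem_insertBy _ _ _ _).mp hz with rfl | hz'
      · omega
      · exact hy z hz'

theorem pvFoldl_filter {α : Type} (key : α → Nat) (v : Nat) :
    ∀ (xs acc : List α), acc.Pairwise (fun a b => key a ≤ key b) →
      (xs.foldl (fun acc x => PySem.List.insertBy (fun a b => decide (key a < key b)) x acc) acc).filter
          (fun y => decide (key y = v)) =
        acc.filter (fun y => decide (key y = v)) ++ xs.filter (fun y => decide (key y = v)) := by
  intro xs
  induction xs with
  | nil => intro acc _; simp
  | cons x xs' ih =>
    intro acc hacc
    simp only [List.foldl_cons]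
    rw [ih _ (pvPairwise_insertBy key x acc hacc), pvFilter_insertBy key x acc hacc v,
      List.filter_cons]
    by_cases hv : key x = v <;> simp [hv]

theorem pvSorted_filter {α : Type} (xs : List α) (key : α → Nat) (v : Nat) :
    (PySem.List.sorted xs key false).filter (fun y => decide (key y = v)) =
      xs.filter (fun y => decide (key y = v)) := by
  rw [PySem.List.sorted_eq_foldl_insertBy]
  simpa using pvFoldl_filter key v xs [] (by simp)

theorem pvEq_of_fiber {α : Type} (key : α → Nat) :
    ∀ (R M : List α), R.Pairwise (fun a b => key a ≤ key b) →
      M.Pairwise (fun a b => key a ≤ key b) →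
      (∀ v, R.filter (fun y => decide (key y = v)) = M.filter (fun y => decide (key y = v))) →
      R = M := by
  intro R
  induction R with
  | nil =>
    intro M _ _ hf
    cases M with
    | nil => rfl
    | cons m M' =>
      have := hf (key m)
      simp [List.filter_cons] at this
  | cons r R' ih =>
    intro M hR hM hf
    cases M with
    | nil =>
      have := hf (key r)
      simp [List.filter_cons] at this
    | cons m M' =>
      rcases List.pairwise_cons.mp hR with ⟨hr, hR'⟩
      rcases List.pairwise_cons.mp hM with ⟨hm, hM'⟩
      have hkrm : key r = key m := by
        have h1 := hf (key m)
        have h2 := hf (key r)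
        rw [List.filter_cons, List.filter_cons] at h1
        rw [List.filter_cons, List.filter_cons] at h2
        have e1 : ∃ x ∈ r :: R', key x = key m := by
          by_contra hc
          push_neg at hc
          have hrm := hc r List.mem_cons_self
          have hR'f : R'.filter (fun y => decide (key y = key m)) = [] := by
            rw [List.filter_eq_nil_iff]; intro z hz
            simpa using hc z (List.mem_cons_of_mem _ hz)
          simp [hrm, hR'f] at h1
        have e2 : ∃ x ∈ m :: M', key x = key r := by
          by_contra hc
          push_neg at hc
          have hmr := hc m List.mem_cons_self
          have hM'f : M'.filter (fun y => decide (key y = key r)) = [] := by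
            rw [List.filter_eq_nil_iff]; intro z hz
            simpa using hc z (List.mem_cons_of_mem _ hz)
          simp [hmr, hM'f] at h2
        rcases e1 with ⟨x, hx, hxk⟩
        rcases e2 with ⟨y, hy, hyk⟩
        have h3 : key r ≤ key m := by
          rcases List.mem_cons.mp hx with rfl | hx'
          · omega
          · have := hr x hx'; omega
        have h4 : key m ≤ key r := by
          rcases List.mem_cons.mp hy with rfl | hy'
          · omega
          · have := hm y hy'; omega
        omega
      have h5 := hf (key m)
      rw [List.filter_cons, List.filter_cons] at h5
      simp only [hkrm, decide_true, if_true] at h5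
      rw [List.cons_eq_cons] at h5
      rcases h5 with ⟨hrm_eq, htail⟩
      have hRM : ∀ v, R'.filter (fun y => decide (key y = v)) = M'.filter (fun y => decide (key y = v)) := by
        intro v
        have h6 := hf v
        rw [List.filter_cons, List.filter_cons] at h6
        by_cases hv : v = key m
        · subst hv; exact htail
        · have hrv : ¬ (key r = v) := by omega
          have hmv : ¬ (key m = v) := by omega
          simp only [hrv, hmv, decide_false, Bool.false_eq_true, if_false] at h6
          exact h6
      rw [hrm_eq, ih M' hR' hM' hRM]

theorem pvFilter_fiber {α : Type} (key : α → Nat) (L : List α) (k v : Nat) :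
    (L.filter (fun p => decide (key p = k))).filter (fun p => decide (key p = v)) =
      if v = k then L.filter (fun p => decide (key p = k)) else [] := by
  rw [List.filter_filter]
  by_cases hv : v = k
  · subst hv; simp
  · rw [if_neg hv, List.filter_eq_nil_iff]
    intro z hz
    simp only [Bool.and_eq_true, decide_eq_true_eq]
    rintro ⟨h1, h2⟩; omega

theorem pvPairwise_const {α : Type} (key : α → Nat) (k : Nat) :
    ∀ (l : List α), (∀ x ∈ l, key x = k) → l.Pairwise (fun a b => key a ≤ key b) := by
  intro l
  induction l with
  | nil => intro _; exact List.Pairwise.nil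
  | cons x xs ih =>
    intro h
    refine List.pairwise_cons.mpr ⟨?_, ih (fun y hy => h y (List.mem_cons_of_mem _ hy))⟩
    intro z hz
    rw [h x List.mem_cons_self, h z (List.mem_cons_of_mem _ hz)]

theorem pvSortedFst_split (L : List (Nat × String)) (h4 : ∀ p ∈ L, p.1 < 4) :
    PySem.List.sorted L (fun p => p.1) false =
      L.filter (fun p => decide (p.1 = 0)) ++ L.filter (fun p => decide (p.1 = 1)) ++
      L.filter (fun p => decide (p.1 = 2)) ++ L.filter (fun p => decide (p.1 = 3)) := by
  have hmemf : ∀ (k : Nat) (p : Nat × String), p ∈ L.filter (fun p => decide (p.1 = k)) → p.1 = k := by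
    intro k p hp
    simpa using (List.mem_filter.mp hp).2
  have hconst : ∀ k, (L.filter (fun p => decide (p.1 = k))).Pairwise
      (fun a b => (fun p : Nat × String => p.1) a ≤ (fun p : Nat × String => p.1) b) :=
    fun k => pvPairwise_const (fun p : Nat × String => p.1) k _ (hmemf k)
  have hcross : ∀ (k k' : Nat), k ≤ k' → ∀ a ∈ L.filter (fun p => decide (p.1 = k)),
      ∀ b ∈ L.filter (fun p => decide (p.1 = k')), a.1 ≤ b.1 := by
    intro k k' hkk a ha b hb
    rw [hmemf k a ha, hmemf k' b hb]; exact hkk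
  apply pvEq_of_fiber (fun p => p.1)
  · exact PySem.List.sorted_pairwise L (fun p => p.1)
  · refine List.pairwise_append.mpr ⟨List.pairwise_append.mpr
      ⟨List.pairwise_append.mpr ⟨hconst 0, hconst 1, hcross 0 1 (by omega)⟩, hconst 2, ?_⟩,
      hconst 3, ?_⟩
    · intro a ha b hb
      rcases List.mem_append.mp ha with h | h
      · exact hcross 0 2 (by omega) a h b hb
      · exact hcross 1 2 (by omega) a h b hb
    · intro a ha b hb
      rcases List.mem_append.mp ha with h | h
      · rcases List.mem_append.mp h with h' | h'
        · exact hcross 0 3 (by omega) a h' b hb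
        · exact hcross 1 3 (by omega) a h' b hb
      · exact hcross 2 3 (by omega) a h b hb
  · intro v
    rw [pvSorted_filter, List.filter_append, List.filter_append, List.filter_append,
      pvFilter_fiber, pvFilter_fiber, pvFilter_fiber, pvFilter_fiber]
    by_cases h0 : v = 0
    · subst h0; simp
    by_cases h1 : v = 1
    · subst h1; simp
    by_cases h2 : v = 2
    · subst h2; simp
    by_cases h3 : v = 3
    · subst h3; simp
    have : L.filter (fun p => decide (p.1 = v)) = [] := by
      rw [List.filter_eq_nil_iff]
      intro z hz
      have := h4 z hz
      simp only [decide_eq_true_eq]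
      omega
    simp [h0, h1, h2, h3, this]


theorem pvStepB_eq (code businessLine : List String) (isActive : List Bool)
    (hpre : Pre_validateCoupons code businessLine isActive)
    (n : Nat) (hn : n < code.length) (pairs : List (Nat × String)) :
    pvStepB code businessLine isActive pairs n =
      pairs ++ (pvAccOpt code businessLine isActive n).toList := by
  rcases hpre with ⟨h1, h2⟩
  have hbl : n < businessLine.length := lt_of_lt_of_le hn h1
  have e1 : PySem.List.pyGet? businessLine (n : Int) = some businessLine[n] := by
    rw [PySem.List.pyGet?_natCast, List.getElem?_eq_getElem hbl]
  rw [pvStepB, e1, pvAccOpt]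
  by_cases hln : businessLine[n] ∈ pvLinesB
  · have hia : n < isActive.length := by
      apply h2 n hn
      rw [List.getD_eq_getElem _ _ hbl]
      simpa [pvLinesB] using hln
    have e2 : PySem.List.pyGet? isActive (n : Int) = some isActive[n] := by
      rw [PySem.List.pyGet?_natCast, List.getElem?_eq_getElem hia]
    have e3 : PySem.List.pyGet? code (n : Int) = some code[n] := by
      rw [PySem.List.pyGet?_natCast, List.getElem?_eq_getElem hn]
    rw [e2, e3]
    by_cases hact : isActive[n] = true
    · by_cases ha : code[n] = ""
      · simp [List.getElem?_eq_getElem, hbl, hia, hn, hln, hact, ha]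
      · by_cases hok : pvOkB code[n] = true
        · simp [List.getElem?_eq_getElem, hbl, hia, hn, hln, hact, ha, hok]
        · simp [List.getElem?_eq_getElem, hbl, hia, hn, hln, hact, ha, hok]
    · simp [List.getElem?_eq_getElem, hbl, hia, hn, hln, hact]
  · simp [List.getElem?_eq_getElem, hbl, hn, hln]

theorem pvLine_roundtrip (ln : String) (hln : ln ∈ pvLinesB) :
    pvLinesA.getD (pvIdxB ln) "" = ln := by
  simp only [pvLinesB, List.mem_cons, List.mem_singleton, List.not_mem_nil, or_false] at hln
  rcases hln with rfl | rfl | rfl | rfl <;> decide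

theorem pvIdxB_lt (ln : String) (hln : ln ∈ pvLinesB) : pvIdxB ln < 4 := by
  simp only [pvLinesB, List.mem_cons, List.mem_singleton, List.not_mem_nil, or_false] at hln
  rcases hln with rfl | rfl | rfl | rfl <;> decide

theorem pvAccept_iff (a : String) :
    (pvCountA a.toList 0 = a.toList.length) ↔ pvOkB a = true := by
  rw [pvOkB, List.all_eq_true]
  have h := pvCountA_eq_iff a.toList 0
  simp only [Nat.zero_add] at h
  rw [h]
  constructor
  · intro hh ch hch; simpa using hh ch hch
  · intro hh ch hch; simpa using hh ch hch

theorem pvStepA_eq (code businessLine : List String) (isActive : List Bool)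
    (hpre : Pre_validateCoupons code businessLine isActive)
    (n : Nat) (hn : n < code.length) (d : PySem.Dict String (List String)) :
    pvStepA code businessLine isActive d n =
      match pvAccOpt code businessLine isActive n with
      | none => d
      | some p => d.modify (pvLinesA.getD p.1 "") [] (fun xs => xs ++ [p.2]) := by
  rcases hpre with ⟨h1, h2⟩
  have hbl : n < businessLine.length := lt_of_lt_of_le hn h1
  have e1 : PySem.List.pyGet? businessLine (n : Int) = some businessLine[n] := by
    rw [PySem.List.pyGet?_natCast, List.getElem?_eq_getElem hbl]
  rw [pvStepA, e1, pvAccOpt]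
  by_cases hln : businessLine[n] ∈ pvLinesA
  · have hlnB : businessLine[n] ∈ pvLinesB := hln
    have hia : n < isActive.length := by
      apply h2 n hn
      rw [List.getD_eq_getElem _ _ hbl]
      simpa [pvLinesB] using hlnB
    have e2 : PySem.List.pyGet? isActive (n : Int) = some isActive[n] := by
      rw [PySem.List.pyGet?_natCast, List.getElem?_eq_getElem hia]
    have e3 : PySem.List.pyGet? code (n : Int) = some code[n] := by
      rw [PySem.List.pyGet?_natCast, List.getElem?_eq_getElem hn]
    rw [e2, e3]
    by_cases hact : isActive[n] = true
    · by_cases ha : code[n] = ""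
      · simp [List.getElem?_eq_getElem, hbl, hia, hn, hln, hlnB, hact, ha]
      · by_cases hok : pvOkB code[n] = true
        · have hcnt : pvCountA code[n].toList 0 = code[n].length := by
            have := (pvAccept_iff code[n]).mpr hok; simpa using this
          have hrt := pvLine_roundtrip businessLine[n] hlnB
          rw [List.getD_eq_getElem?_getD] at hrt
          simp [List.getElem?_eq_getElem, hbl, hia, hn, hln, hlnB, hact, ha, hok, hcnt, hrt]
        · have hcnt : ¬ (pvCountA code[n].toList 0 = code[n].length) := by
            have : ¬ (pvCountA code[n].toList 0 = code[n].toList.length) := by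
              rw [pvAccept_iff]; simpa using hok
            simpa using this
          simp [List.getElem?_eq_getElem, hbl, hia, hn, hln, hlnB, hact, ha, hok, hcnt]
    · simp [List.getElem?_eq_getElem, hbl, hia, hn, hln, hlnB, hact]
  · have hlnB : businessLine[n] ∉ pvLinesB := hln
    simp [List.getElem?_eq_getElem, hbl, hn, hln, hlnB]

theorem pvPairs_succ (code businessLine : List String) (isActive : List Bool) (n : Nat) :
    pvPairs code businessLine isActive (n + 1) =
      pvPairs code businessLine isActive n ++ (pvAccOpt code businessLine isActive n).toList := by
  rw [pvPairs, pvPairs, List.range_succ, List.filterMap_append, List.filterMap_cons,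
    List.filterMap_nil]
  cases pvAccOpt code businessLine isActive n <;> simp

theorem pvLoopB_eq (code businessLine : List String) (isActive : List Bool)
    (hpre : Pre_validateCoupons code businessLine isActive) :
    ∀ n, n ≤ code.length →
      (List.range n).foldl (pvStepB code businessLine isActive) [] =
        pvPairs code businessLine isActive n := by
  intro n
  induction n with
  | zero => intro _; rfl
  | succ n ih =>
    intro hn
    rw [List.range_succ, List.foldl_append, ih (by omega), List.foldl_cons, List.foldl_nil,
      pvStepB_eq code businessLine isActive hpre n (by omega), pvPairs_succ]

theorem pvD0A_keys : pvD0A.keys = ["electronics", "grocery", "pharmacy", "restaurant"] := by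
  decide

theorem pvLinesA_getD_inj (k k' : Nat) (hk : k < 4) (hk' : k' < 4) :
    pvLinesA.getD k "" = pvLinesA.getD k' "" ↔ k = k' := by
  interval_cases k <;> interval_cases k' <;> simp <;> decide

theorem pvLoopA_eq (code businessLine : List String) (isActive : List Bool)
    (hpre : Pre_validateCoupons code businessLine isActive) :
    ∀ n, n ≤ code.length →
      ((List.range n).foldl (pvStepA code businessLine isActive) pvD0A).keys = pvD0A.keys ∧
      ∀ k, k < 4 →
        ((List.range n).foldl (pvStepA code businessLine isActive) pvD0A).getD (pvLinesA.getD k "") [] =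
          ((pvPairs code businessLine isActive n).filter (fun p => decide (p.1 = k))).map (fun p => p.2) := by
  intro n
  induction n with
  | zero =>
    intro _
    refine ⟨rfl, ?_⟩
    intro k hk
    rw [pvPairs]
    simp only [List.range_zero, List.filterMap_nil, List.filter_nil, List.map_nil, List.foldl_nil]
    interval_cases k <;> decide
  | succ n ih =>
    intro hn
    rcases ih (by omega) with ⟨ihk, ihb⟩
    rw [List.range_succ, List.foldl_append, List.foldl_cons, List.foldl_nil,
      pvStepA_eq code businessLine isActive hpre n (by omega), pvPairs_succ]
    rcases hacc : pvAccOpt code businessLine isActive n with _ | ⟨k0, a⟩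
    · simpa using ⟨ihk, fun k hk => by simpa using ihb k hk⟩
    · -- accepted: key k0 < 4
      have hk0 : k0 < 4 := by
        rw [pvAccOpt] at hacc
        split at hacc
        · rename_i hcond
          have := pvIdxB_lt _ hcond.1
          simp only [Option.some.injEq, Prod.mk.injEq] at hacc
          omega
        · exact absurd hacc (by simp)
      constructor
      · rw [PySem.Dict.keys_modify, PySem.Dict.keys_insert_of_contains, ihk]
        rw [PySem.Dict.contains_iff_mem_keys, ihk, pvD0A_keys]
        interval_cases k0 <;> simp [pvLinesA]
      · intro k hk
        rw [PySem.Dict.getD_modify, List.filter_append, List.map_append]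
        by_cases hkk : k = k0
        · subst hkk
          rw [if_pos rfl, ihb k hk]
          simp
        · rw [if_neg (by rw [pvLinesA_getD_inj k k0 hk hk0]; exact hkk), ihb k hk]
          simp [Ne.symm hkk, hkk]


theorem pvPairs_fst_lt (code businessLine : List String) (isActive : List Bool) (n : Nat) :
    ∀ p ∈ pvPairs code businessLine isActive n, p.1 < 4 := by
  intro p hp
  rw [pvPairs] at hp
  rcases List.mem_filterMap.mp hp with ⟨i, _, hacc⟩
  rw [pvAccOpt] at hacc
  split at hacc
  · rename_i hcond
    have := pvIdxB_lt _ hcond.1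
    simp only [Option.some.injEq] at hacc
    rw [← hacc]
    exact this
  · exact absurd hacc (by simp)

theorem pvIfExtend (l v : List String) : (if v ≠ [] then l ++ v else l) = l ++ v := by
  by_cases hv : v = [] <;> simp [hv]

theorem pvBlock (P : List (Nat × String)) (k : Nat) :
    PySem.List.sorted ((P.filter (fun p => decide (p.1 = k))).map (fun p => p.2)) (fun x => x) false =
      ((PySem.List.sorted P (fun p => p.2) false).filter (fun p => decide (p.1 = k))).map
        (fun p => p.2) := by
  apply PySem.List.sorted_id_eq_of_perm_of_pairwise
  · exact ((PySem.List.sorted_perm P (fun p => p.2) false).filter _).map _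
  · rw [List.pairwise_map]
    exact ((PySem.List.sorted_pairwise P (fun p => p.2)).sublist List.filter_sublist).imp
      (fun h => h)

-- ===== VERDICT (by name: the statement is the Claim_ definition above) =====
theorem validateCoupons_spec : Claim_equal_validateCoupons := by
  unfold Claim_equal_validateCoupons
  intro code businessLine isActive hdom hpre
  unfold Spec_validateCoupons
  simp only [validateCoupons, validateCoupons_alt]
  rw [pvLoopB_eq code businessLine isActive hpre code.length le_rfl]
  obtain ⟨hk, hb⟩ := pvLoopA_eq code businessLine isActive hpre code.length le_rfl
  rw [hk, pvD0A_keys]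
  -- B side: split the primary sort into the four key fibers
  rw [pvSortedFst_split _ (fun p hp =>
    pvPairs_fst_lt code businessLine isActive code.length p
      ((PySem.List.mem_sorted _ _ _ _).mp hp))]
  simp only [List.foldl_cons, List.foldl_nil]
  set D := List.foldl (pvStepA code businessLine isActive) pvD0A (List.range code.length) with hD
  set f : List String → List String := fun xs => PySem.List.sorted xs (fun x => x) false with hf
  -- keys of the sorted dict
  have hc : ∀ (dd : PySem.Dict String (List String)) (k : String),
      dd.keys = pvD0A.keys → k ∈ pvD0A.keys → (dd.modify k [] f).keys = pvD0A.keys := by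
    intro dd k hdd hkmem
    rw [PySem.Dict.keys_modify, PySem.Dict.keys_insert_of_contains, hdd]
    rw [PySem.Dict.contains_iff_mem_keys, hdd]
    exact hkmem
  have hk1 := hc D "electronics" hk (by rw [pvD0A_keys]; decide)
  have hk2 := hc _ "grocery" hk1 (by rw [pvD0A_keys]; decide)
  have hk3 := hc _ "pharmacy" hk2 (by rw [pvD0A_keys]; decide)
  have hk4 := hc _ "restaurant" hk3 (by rw [pvD0A_keys]; decide)
  rw [hk4, pvD0A_keys]
  -- bucket values of the sorted dict
  have hg0 : ((((D.modify "electronics" [] f).modify "grocery" [] f).modify "pharmacy" [] f).modify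
      "restaurant" [] f).getD "electronics" [] = f (D.getD "electronics" []) := by
    rw [PySem.Dict.getD_modify, if_neg (by decide), PySem.Dict.getD_modify, if_neg (by decide),
      PySem.Dict.getD_modify, if_neg (by decide), PySem.Dict.getD_modify, if_pos rfl]
  have hg1 : ((((D.modify "electronics" [] f).modify "grocery" [] f).modify "pharmacy" [] f).modify
      "restaurant" [] f).getD "grocery" [] = f (D.getD "grocery" []) := by
    rw [PySem.Dict.getD_modify, if_neg (by decide), PySem.Dict.getD_modify, if_neg (by decide),
      PySem.Dict.getD_modify, if_pos rfl, PySem.Dict.getD_modify, if_neg (by decide)]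
  have hg2 : ((((D.modify "electronics" [] f).modify "grocery" [] f).modify "pharmacy" [] f).modify
      "restaurant" [] f).getD "pharmacy" [] = f (D.getD "pharmacy" []) := by
    rw [PySem.Dict.getD_modify, if_neg (by decide), PySem.Dict.getD_modify, if_pos rfl,
      PySem.Dict.getD_modify, if_neg (by decide), PySem.Dict.getD_modify, if_neg (by decide)]
  have hg3 : ((((D.modify "electronics" [] f).modify "grocery" [] f).modify "pharmacy" [] f).modify
      "restaurant" [] f).getD "restaurant" [] = f (D.getD "restaurant" []) := by
    rw [PySem.Dict.getD_modify, if_pos rfl, PySem.Dict.getD_modify, if_neg (by decide),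
      PySem.Dict.getD_modify, if_neg (by decide), PySem.Dict.getD_modify, if_neg (by decide)]
  simp only [List.foldl_cons, List.foldl_nil, hg0, hg1, hg2, hg3, pvIfExtend]
  -- buckets are the key fibers of the accepted pairs
  have he0 : pvLinesA.getD 0 "" = "electronics" := by decide
  have he1 : pvLinesA.getD 1 "" = "grocery" := by decide
  have he2 : pvLinesA.getD 2 "" = "pharmacy" := by decide
  have he3 : pvLinesA.getD 3 "" = "restaurant" := by decide
  have hb0 := hb 0 (by omega); rw [he0] at hb0
  have hb1 := hb 1 (by omega); rw [he1] at hb1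
  have hb2 := hb 2 (by omega); rw [he2] at hb2
  have hb3 := hb 3 (by omega); rw [he3] at hb3
  rw [hb0, hb1, hb2, hb3, hf]
  simp only []
  rw [pvBlock, pvBlock, pvBlock, pvBlock]
  simp [List.map_append]
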